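-- pv_equiv track=rewrite | github.com/KeigoUtdMa/TweetsClusteringUsing_KMeans | Tweet_Cluster_K_Means.py | tweetIntersection
-- ===== SOURCE A (Python) =====
-- def tweetIntersection(tweet1, tweet2):
--     result = 0
--     for word in tweet1:
--         while tweet1[word] != 0 and word in tweet2:
--             if word in tweet2:
--                 tweet2[word] = tweet2[word] - 1
--                 tweet1[word] = tweet1[word] - 1
--                 if tweet2[word] == 0:
--                     tweet2.pop(word, None)
--                 result += 1
--     return result
-- ===== SOURCE B (Python) =====
-- def tweetIntersection(tweet1, tweet2):
--     # Weighted intersection of two word-count dicts: sum of the min counts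
--     # over the words they share.  Reads only; does not mutate its arguments.
--     return sum(min(c, tweet2[w]) for w, c in tweet1.items() if w in tweet2)
-- ===== Notes on version B (the rewrite author's own statement) =====
-- stated objective: simpler
-- what changed: replaces A's per-unit inner while loop (one dict update per transferred count, with in-place mutation of both dicts) by a single read-only comprehension summing min(c1,c2) over the shared words; Pre_ excludes inputs where a word shared by both dicts carries a negative count or a positive tweet1 count against a zero tweet2 count: word counts are nonnegative frequencies, and on those inputs A's unit-transfer loop diverges or returns the leftover count of the non-exhausted side rather than any count of common occurrences
-- outside the precondition, e.g. on tweetIntersection({'a': 2}, {'a': 0}): A returns 2, B returns 0; on tweetIntersection({'a': -1}, {'a': 3}): A returns 3, B returns -1; on tweetIntersection({'a': -1}, {'a': 0}): A does not finish within the time limit, B returns -1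
import Mathlib
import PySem

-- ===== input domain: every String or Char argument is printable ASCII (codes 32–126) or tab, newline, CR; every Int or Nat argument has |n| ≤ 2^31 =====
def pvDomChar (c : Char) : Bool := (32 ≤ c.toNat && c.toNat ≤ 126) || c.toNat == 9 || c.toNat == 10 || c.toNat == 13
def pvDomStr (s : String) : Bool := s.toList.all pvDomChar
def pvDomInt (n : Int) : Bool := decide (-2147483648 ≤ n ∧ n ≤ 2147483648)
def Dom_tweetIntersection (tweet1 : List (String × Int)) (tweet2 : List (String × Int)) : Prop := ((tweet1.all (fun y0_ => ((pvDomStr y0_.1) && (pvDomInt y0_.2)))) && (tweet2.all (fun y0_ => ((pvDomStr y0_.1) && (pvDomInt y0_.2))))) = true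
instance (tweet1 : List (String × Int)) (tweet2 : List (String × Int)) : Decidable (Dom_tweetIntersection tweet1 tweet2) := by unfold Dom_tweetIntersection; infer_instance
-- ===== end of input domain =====

-- B replaces A's per-unit while loop (which mutates both dicts one transferred count at a
-- time) by one read-only comprehension summing min(c1,c2) over the shared words; the
-- equivalence is about the RETURN value only (A mutates its dict arguments, B does not).


-- ===== PORT A =====
-- the body of A's 'while tweet1[word] != 0 and word in tweet2' loop; fuel is only a
-- totality guard (under Pre_ it is always sufficient, see pvLoopA_spec below).
-- 'word' is always a key of tweet1, so Python's tweet1[word] cannot raise; it is read as getD _ 0.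
def pvLoopA (fuel : Nat) (d1 d2 : PySem.Dict String Int) (word : String) (result : Int) :
    PySem.Dict String Int × PySem.Dict String Int × Int :=
  match fuel with
  | 0 => (d1, d2, result)
  | Nat.succ f =>
    if (d1.getD word 0 != 0) && d2.contains word then
      -- the inner 'if word in tweet2' re-check is always true here
      let d2a := d2.insert word (d2.getD word 0 - 1)
      let d1a := d1.insert word (d1.getD word 0 - 1)
      let d2b := if d2a.getD word 0 == 0 then d2a.erase word else d2a
      pvLoopA f d1a d2b word (result + 1)
    else (d1, d2, result)

def tweetIntersection (tweet1 : List (String × Int)) (tweet2 : List (String × Int)) : Int :=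
  (((PySem.Dict.mk tweet1).keys).foldl
    (fun (st : PySem.Dict String Int × PySem.Dict String Int × Int) word =>
      pvLoopA ((st.1.getD word 0).natAbs + (st.2.1.getD word 0).natAbs + 1)
        st.1 st.2.1 word st.2.2)
    (PySem.Dict.mk tweet1, PySem.Dict.mk tweet2, (0 : Int))).2.2

-- ===== PORT B =====
-- Source B's 'sum(min(c, tweet2[w]) for w, c in tweet1.items() if w in tweet2)' as the fold
-- the generator sum performs: the guarded lookup 'w in tweet2 … tweet2[w]' is the Dict.get? match.
def tweetIntersection_alt (tweet1 : List (String × Int)) (tweet2 : List (String × Int)) : Int :=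
  (PySem.Dict.mk tweet1).items.foldl
    (fun acc p =>
      match (PySem.Dict.mk tweet2).get? p.1 with
      | none => acc
      | some c2 => acc + min p.2 c2)
    0

-- ===== PRECONDITION & SPEC =====
-- Pre_ excludes association lists with duplicate keys (a Python dict cannot contain them)
-- and inputs where a word shared by both dicts carries a negative count or a positive
-- tweet1 count against a zero tweet2 count: word counts are nonnegative frequencies, and
-- on those inputs A's unit-transfer loop diverges (both sides non-positive) or returns the
-- leftover count of the non-exhausted side rather than any count of common occurrences.
def Pre_tweetIntersection (tweet1 : List (String × Int)) (tweet2 : List (String × Int)) : Prop :=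
  (tweet1.map Prod.fst).Nodup ∧ (tweet2.map Prod.fst).Nodup ∧
  ∀ p ∈ tweet1, ∀ q ∈ tweet2, q.1 = p.1 → 0 ≤ p.2 ∧ 0 ≤ q.2 ∧ (0 < p.2 → q.2 ≠ 0)
instance (tweet1 : List (String × Int)) (tweet2 : List (String × Int)) : Decidable (Pre_tweetIntersection tweet1 tweet2) := by unfold Pre_tweetIntersection; infer_instance

def pvWitness_tweetIntersection : (List (String × Int)) × (List (String × Int)) :=
  ([("a", 2), ("b", 1)], [("a", 1), ("c", 3)])

def Spec_tweetIntersection (tweet1 : List (String × Int)) (tweet2 : List (String × Int)) (out : Int) : Prop := out = tweetIntersection_alt tweet1 tweet2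
instance (tweet1 : List (String × Int)) (tweet2 : List (String × Int)) (out : Int) : Decidable (Spec_tweetIntersection tweet1 tweet2 out) := by unfold Spec_tweetIntersection; infer_instance

-- ===== CLAIM (what is proved, stated in full; the proofs are below) =====
def Claim_equal_tweetIntersection : Prop := ∀ (tweet1 : List (String × Int)) (tweet2 : List (String × Int)), Dom_tweetIntersection tweet1 tweet2 → Pre_tweetIntersection tweet1 tweet2 → Spec_tweetIntersection tweet1 tweet2 (tweetIntersection tweet1 tweet2)

-- ===== LEMMAS AND PROOFS =====

lemma pvGet?_erase_self (d : PySem.Dict String Int) (k : String) :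
    (d.erase k).get? k = none := by
  simp [PySem.Dict.erase, PySem.Dict.get?, List.find?_eq_none]

lemma pvGet?_erase_of_ne (d : PySem.Dict String Int) (k k' : String) (h : k' ≠ k) :
    (d.erase k).get? k' = d.get? k' := by
  simp only [PySem.Dict.erase, PySem.Dict.get?]
  congr 1
  induction d.items with
  | nil => rfl
  | cons p rest ih =>
    rw [List.filter_cons]
    cases hpk : (p.1 == k) with
    | true =>
      have hpk' : (p.1 == k') = false :=
        beq_eq_false_iff_ne.mpr (fun e => h (e.symm.trans (eq_of_beq hpk)))
      simp [hpk', ih]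
    | false =>
      simp only [Bool.not_false, if_true]
      rw [List.find?_cons, List.find?_cons]
      cases p.1 == k' <;> simp [ih]

lemma pvLoopA_none (fuel : Nat) (d1 d2 : PySem.Dict String Int) (w : String) (r : Int)
    (h : d2.get? w = none) : pvLoopA fuel d1 d2 w r = (d1, d2, r) := by
  cases fuel with
  | zero => rfl
  | succ f =>
    have hc : d2.contains w = false := by
      rw [PySem.Dict.contains_eq_isSome_get?, h]; rfl
    simp [pvLoopA, hc]

lemma pvLoopA_spec (w : String) : ∀ (fuel : Nat) (c1 c2 : Int)
    (d1 d2 : PySem.Dict String Int) (r : Int),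
    d1.get? w = some c1 → d2.get? w = some c2 →
    0 ≤ c1 → 0 ≤ c2 → (0 < c1 → c2 ≠ 0) →
    (min c1 c2).toNat < fuel →
    (pvLoopA fuel d1 d2 w r).2.2 = r + min c1 c2 ∧
    (∀ w', w' ≠ w → (pvLoopA fuel d1 d2 w r).1.get? w' = d1.get? w' ∧
                    (pvLoopA fuel d1 d2 w r).2.1.get? w' = d2.get? w') := by
  intro fuel
  induction fuel with
  | zero => intro c1 c2 d1 d2 r _ _ _ _ _ hf; omega
  | succ f ih =>
    intro c1 c2 d1 d2 r hd1 hd2 hc1n hc2n hpos hf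
    have hgd1 : d1.getD w 0 = c1 := by rw [PySem.Dict.getD_eq_get?_getD, hd1]; rfl
    have hgd2 : d2.getD w 0 = c2 := by rw [PySem.Dict.getD_eq_get?_getD, hd2]; rfl
    have hcont : d2.contains w = true := by
      rw [PySem.Dict.contains_eq_isSome_get?, hd2]; rfl
    by_cases hc1 : c1 = 0
    · subst hc1
      have : ((d1.getD w 0 != 0) && d2.contains w) = false := by simp [hgd1]
      rw [show pvLoopA (f + 1) d1 d2 w r = (d1, d2, r) from by simp [pvLoopA, this]]
      refine ⟨?_, fun w' _ => ⟨rfl, rfl⟩⟩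
      have : min (0 : Int) c2 = 0 := by omega
      rw [this]; ring
    · have hc2 : c2 ≠ 0 := hpos (by omega)
      have hcond : ((d1.getD w 0 != 0) && d2.contains w) = true := by
        simp [hgd1, hcont, hc1]
      simp only [pvLoopA, hcond, if_true]
      rw [hgd1, hgd2]
      have hins2 : (d2.insert w (c2 - 1)).getD w 0 = c2 - 1 := by
        rw [PySem.Dict.getD_eq_get?_getD, PySem.Dict.get?_insert_self]; rfl
      by_cases hc21 : c2 = 1
      · subst hc21
        have : ((d2.insert w (1 - 1 : Int)).getD w 0 == 0) = true := by
          rw [hins2]; rfl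
        simp only [this, if_true]
        rw [pvLoopA_none f _ _ w _ (pvGet?_erase_self _ w)]
        have hmin : min c1 (1 : Int) = 1 := by omega
        refine ⟨by rw [hmin], fun w' hw' => ?_⟩
        exact ⟨PySem.Dict.get?_insert_of_ne _ _ hw',
          by rw [pvGet?_erase_of_ne _ _ _ hw', PySem.Dict.get?_insert_of_ne _ _ hw']⟩
      · have : ((d2.insert w (c2 - 1)).getD w 0 == 0) = false := by
          rw [hins2]; simp; omega
        simp only [this, Bool.false_eq_true, if_false]
        have hrec := ih (c1 - 1) (c2 - 1) (d1.insert w (c1 - 1)) (d2.insert w (c2 - 1))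
          (r + 1) (PySem.Dict.get?_insert_self _ _ _) (PySem.Dict.get?_insert_self _ _ _)
          (by omega) (by omega) (by intro _; omega)
          (by omega)
        refine ⟨by rw [hrec.1]; omega, fun w' hw' => ?_⟩
        have hp := hrec.2 w' hw'
        exact ⟨by rw [hp.1, PySem.Dict.get?_insert_of_ne _ _ hw'],
               by rw [hp.2, PySem.Dict.get?_insert_of_ne _ _ hw']⟩

lemma pvFold_spec (t2b : PySem.Dict String Int) :
    ∀ (s : List (String × Int)) (d1 d2 : PySem.Dict String Int) (r : Int),
    (s.map Prod.fst).Nodup →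
    (∀ p ∈ s, d1.get? p.1 = some p.2) →
    (∀ p ∈ s, d2.get? p.1 = t2b.get? p.1) →
    (∀ p ∈ s, ∀ c2, t2b.get? p.1 = some c2 → 0 ≤ p.2 ∧ 0 ≤ c2 ∧ (0 < p.2 → c2 ≠ 0)) →
    ((s.map Prod.fst).foldl
      (fun (st : PySem.Dict String Int × PySem.Dict String Int × Int) word =>
        pvLoopA ((st.1.getD word 0).natAbs + (st.2.1.getD word 0).natAbs + 1)
          st.1 st.2.1 word st.2.2)
      (d1, d2, r)).2.2
    = s.foldl (fun acc p => match t2b.get? p.1 with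
        | none => acc
        | some c2 => acc + min p.2 c2) r := by
  intro s
  induction s with
  | nil => intro d1 d2 r _ _ _ _; rfl
  | cons p rest ih =>
    intro d1 d2 r hnd h1 h2 hpre
    have hnd' : (rest.map Prod.fst).Nodup := (List.nodup_cons.mp hnd).2
    have hnotin : p.1 ∉ rest.map Prod.fst := (List.nodup_cons.mp hnd).1
    have hgd1 : d1.getD p.1 0 = p.2 := by
      rw [PySem.Dict.getD_eq_get?_getD, h1 p (List.mem_cons_self)]; rfl
    simp only [List.map_cons, List.foldl_cons]
    cases ht2 : t2b.get? p.1 with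
    | none =>
      have hd2n : d2.get? p.1 = none := by rw [h2 p (List.mem_cons_self), ht2]
      rw [pvLoopA_none _ _ _ _ _ hd2n]
      exact ih d1 d2 r hnd' (fun q hq => h1 q (List.mem_cons_of_mem _ hq))
        (fun q hq => h2 q (List.mem_cons_of_mem _ hq))
        (fun q hq => hpre q (List.mem_cons_of_mem _ hq))
    | some c2 =>
      have hd2 : d2.get? p.1 = some c2 := by rw [h2 p (List.mem_cons_self), ht2]
      have hgd2 : d2.getD p.1 0 = c2 := by rw [PySem.Dict.getD_eq_get?_getD, hd2]; rfl
      obtain ⟨hp1, hp2, hp3⟩ := hpre p (List.mem_cons_self) c2 ht2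
      have hfuel : (min p.2 c2).toNat < p.2.natAbs + c2.natAbs + 1 := by omega
      have hspec := pvLoopA_spec p.1
        (p.2.natAbs + c2.natAbs + 1) p.2 c2 d1 d2 r
        (h1 p (List.mem_cons_self)) hd2 hp1 hp2 hp3 hfuel
      rcases hu : pvLoopA (p.2.natAbs + c2.natAbs + 1) d1 d2 p.1 r with ⟨a, b, c⟩
      rw [hu] at hspec
      have hne : ∀ q ∈ rest, q.1 ≠ p.1 := by
        intro q hq hqe
        exact hnotin (hqe ▸ List.mem_map_of_mem hq)
      rw [hgd1, hgd2, hu]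
      have hfin := ih a b (r + min p.2 c2) hnd'
        (fun q hq => by rw [(hspec.2 q.1 (hne q hq)).1]; exact h1 q (List.mem_cons_of_mem _ hq))
        (fun q hq => by rw [(hspec.2 q.1 (hne q hq)).2]; exact h2 q (List.mem_cons_of_mem _ hq))
        (fun q hq => hpre q (List.mem_cons_of_mem _ hq))
      have hc : c = r + min p.2 c2 := hspec.1
      rw [hc]
      simpa using hfin

-- ===== VERDICT (by name: the statement is the Claim_ definition above) =====
theorem tweetIntersection_spec : Claim_equal_tweetIntersection := by
  intro t1 t2 _ hpre
  obtain ⟨hnd1, hnd2, hok⟩ := hpre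
  unfold Spec_tweetIntersection tweetIntersection tweetIntersection_alt
  have hkeys : (PySem.Dict.mk t1).keys = t1.map Prod.fst := rfl
  have hitems : (PySem.Dict.mk t1).items = t1 := rfl
  rw [hkeys, hitems]
  refine (pvFold_spec (PySem.Dict.mk t2) t1 (PySem.Dict.mk t1) (PySem.Dict.mk t2) 0
    hnd1 ?_ (fun _ _ => rfl) ?_)
  · intro p hp
    exact PySem.Dict.get?_of_mem_items _ hp hnd1
  · intro p hp c2 hc2
    have hmem : (p.1, c2) ∈ t2 := PySem.Dict.mem_items_of_get?_eq_some _ hc2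
    exact hok p hp (p.1, c2) hmem rfl
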